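-- pv_equiv track=rewrite | github.com/ReginaNasyrova/RussianGEC_SeqTagger | scripts/morpho_tags.py | extract_relevant_tags_from_correct_sents
-- ===== SOURCE A (Python) =====
-- def extract_relevant_tags_from_correct_sents(tags, indices, corrections):
--     """
--     Извлекаем метки нужных слов из исправленных предложений
--     Вход: tags: [[{"form": .., "lemma": ..,..}, {"form1": .., "lemma1": ..,..}]..[..]]
--                 список из словарей тэгов для каждого слова в предложении для каждого предложения
--           indices: список списков индексов ошибок для каждого предложения
--           corrections: список списков исправллений для каждого предложения
--     """
--     relevant_tags = []
--     for tag_list, ids, corrs in zip(tags, indices, corrections):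
--         if ids == [(-1,-1)]:
--             relevant_tags.append(None)
--             continue
--         curr_tags = [] # тэги для предложения
--         cumulative_gain = 0 ## для извлечения метки нужного слова нужно знать его индекс, а для этого --
--                             ## насколько добавление предыдущих исправлений сдвинуло исходные индексы ошибок
--         for x, id_pair in enumerate(ids):
--             curr_tags.append([tag_list[num] for num in range(ids[x][0]+cumulative_gain, ids[x][0]+cumulative_gain+len(corrs[x].split()))])
--             if id_pair[0] == id_pair[1] and corrs[x] != "": #вставка
--                 cumulative_gain += len(corrs[x].split())
--             elif corrs[x] == "" and id_pair[1]>id_pair[0]: #удаление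
--                 cumulative_gain -= (id_pair[1]-id_pair[0])
--             elif corrs[x] != "" and id_pair[1]>id_pair[0]: #замена
--                 cumulative_gain += (len(corrs[x].split())-(id_pair[1]-id_pair[0]))
--
--         relevant_tags.append(curr_tags)
--     return relevant_tags
-- ===== SOURCE B (Python) =====
-- def _collect(tag_list, ids, corrs):
--     # Structural recursion over the error list; the shift per error collapses
--     # A's insertion/deletion/replacement case analysis into one arithmetic
--     # identity: shift = len(corr.split()) - (b - a) when b >= a, else 0.
--     def go(pairs, off):
--         if not pairs:
--             return []
--         (a, b), corr = pairs[0]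
--         w = len(corr.split())
--         start = a + off
--         row = [tag_list[i] for i in range(start, start + w)]
--         shift = w - (b - a) if b >= a else 0
--         return [row] + go(pairs[1:], off + shift)
--     return go(list(zip(ids, corrs)), 0)
--
--
-- def extract_relevant_tags_from_correct_sents(tags, indices, corrections):
--     return [None if ids == [(-1, -1)] else _collect(tag_list, ids, corrs)
--             for tag_list, ids, corrs in zip(tags, indices, corrections)]
-- ===== Notes on version B (the rewrite author's own statement) =====
-- stated objective: simpler
-- what changed: B eliminates A's three-way insertion/deletion/replacement branch analysis using the identity shift = len(corr.split()) - (b - a) when b >= a (else 0), and replaces A's stateful accumulator loop by structural recursion building each sentence's rows front-to-back.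
import Mathlib
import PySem

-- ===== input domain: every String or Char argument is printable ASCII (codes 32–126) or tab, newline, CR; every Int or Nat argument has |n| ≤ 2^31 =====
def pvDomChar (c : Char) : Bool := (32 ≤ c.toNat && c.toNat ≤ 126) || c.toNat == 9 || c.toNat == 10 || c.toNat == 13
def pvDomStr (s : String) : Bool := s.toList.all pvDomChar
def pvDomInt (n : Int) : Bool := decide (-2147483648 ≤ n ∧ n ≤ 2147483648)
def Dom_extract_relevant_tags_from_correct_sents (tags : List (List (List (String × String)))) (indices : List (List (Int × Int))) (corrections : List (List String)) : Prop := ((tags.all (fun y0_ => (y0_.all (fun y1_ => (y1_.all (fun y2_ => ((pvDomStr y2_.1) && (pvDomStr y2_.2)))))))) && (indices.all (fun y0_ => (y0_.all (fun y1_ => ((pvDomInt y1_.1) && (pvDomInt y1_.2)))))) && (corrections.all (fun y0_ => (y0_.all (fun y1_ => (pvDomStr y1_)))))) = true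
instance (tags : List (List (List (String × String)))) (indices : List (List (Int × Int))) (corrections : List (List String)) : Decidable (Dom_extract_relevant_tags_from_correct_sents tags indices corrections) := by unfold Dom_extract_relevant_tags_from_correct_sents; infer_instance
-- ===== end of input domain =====

-- ===== PORT A =====
-- B collapses A's three-branch insertion/deletion/replacement analysis into one arithmetic shift
-- and builds each sentence by structural recursion; same return value (simpler, not faster).
def pvZip3 {a b c : Type} (xs : List a) (ys : List b) (zs : List c) : List (a × b × c) :=
  xs.zip (ys.zip zs)

def extract_relevant_tags_from_correct_sents (tags : List (List (List (String × String)))) (indices : List (List (Int × Int))) (corrections : List (List String)) : List (Option (List (List (List (String × String))))) :=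
  (pvZip3 tags indices corrections).foldl (fun relevant_tags s =>
    let tag_list := s.1
    let ids := s.2.1
    let corrs := s.2.2
    if ids = [((-1 : Int), (-1 : Int))] then relevant_tags ++ [none]
    else
      let st := (PySem.List.enumerate ids).foldl
        (fun (st : List (List (List (String × String))) × Int) e =>
          let x := e.1
          let id_pair := e.2
          let idx0 := (PySem.List.pyGetD ids x ((0 : Int), (0 : Int))).1
          let corr := PySem.List.pyGetD corrs x ""
          let k : Int := (PySem.Str.split₀ corr).length
          let row := (PySem.List.pyRange (idx0 + st.2) (idx0 + st.2 + k) 1).map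
            (fun num => PySem.List.pyGetD tag_list num [])
          let gain :=
            if id_pair.1 = id_pair.2 ∧ corr ≠ "" then st.2 + k
            else if corr = "" ∧ id_pair.1 < id_pair.2 then st.2 - (id_pair.2 - id_pair.1)
            else if corr ≠ "" ∧ id_pair.1 < id_pair.2 then st.2 + (k - (id_pair.2 - id_pair.1))
            else st.2
          (st.1 ++ [row], gain)) ([], (0 : Int))
      relevant_tags ++ [some st.1]) []

-- ===== PORT B =====
-- go(pairs, off) from Source B: structural recursion, closed-form shift.
def pvCollectGo (tag_list : List (List (String × String))) : List ((Int × Int) × String) → Int → List (List (List (String × String)))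
  | [], _ => []
  | (pc :: rest), off =>
    let a := pc.1.1
    let b := pc.1.2
    let corr := pc.2
    let w : Int := (PySem.Str.split₀ corr).length
    let start := a + off
    let row := (PySem.List.pyRange start (start + w) 1).map
      (fun i => PySem.List.pyGetD tag_list i [])
    let shift : Int := if b ≥ a then w - (b - a) else 0
    row :: pvCollectGo tag_list rest (off + shift)

def pvCollect (tag_list : List (List (String × String))) (ids : List (Int × Int)) (corrs : List String) : List (List (List (String × String))) :=
  pvCollectGo tag_list (ids.zip corrs) 0

def extract_relevant_tags_from_correct_sents_alt (tags : List (List (List (String × String)))) (indices : List (List (Int × Int))) (corrections : List (List String)) : List (Option (List (List (List (String × String))))) :=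
  (pvZip3 tags indices corrections).map (fun s =>
    if s.2.1 = [((-1 : Int), (-1 : Int))] then none
    else some (pvCollect s.1 s.2.1 s.2.2))

-- ===== PRECONDITION & SPEC =====
-- per-error index shift (A's cumulative_gain increment), used only to state Pre_
def pvDelta (id_pair : Int × Int) (corr : String) : Int :=
  let k : Int := (PySem.Str.split₀ corr).length
  if id_pair.1 = id_pair.2 ∧ corr ≠ "" then k
  else if corr = "" ∧ id_pair.1 < id_pair.2 then id_pair.1 - id_pair.2
  else if corr ≠ "" ∧ id_pair.1 < id_pair.2 then k - (id_pair.2 - id_pair.1)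
  else 0

-- exclusive-prefix shift of error x (sum of the first x per-error deltas)
def pvGainAt (ids : List (Int × Int)) (corrs : List String) (x : Nat) : Int :=
  ((ids.zip corrs).take x).foldl (fun g pc => g + pvDelta pc.1 pc.2) 0

def pvSentenceOk (tag_list : List (List (String × String))) (ids : List (Int × Int)) (corrs : List String) : Bool :=
  ids = [((-1 : Int), (-1 : Int))] ||
  (decide (ids.length ≤ corrs.length) &&
    (List.range ids.length).all (fun x =>
      let k : Int := (PySem.Str.split₀ (corrs.getD x "")).length
      let s := (ids.getD x ((0 : Int), (0 : Int))).1 + pvGainAt ids corrs x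
      (k == 0) || (decide (-(tag_list.length : Int) ≤ s) && decide (s + k ≤ (tag_list.length : Int)))))

-- Pre_ excludes exactly the inputs on which A raises: a sentence (with ids ≠ [(-1,-1)]) whose
-- corrections list is shorter than its ids list (IndexError on corrs[x]), or in which some accessed
-- word position lies outside Python's valid index range [-len(tag_list), len(tag_list)) (IndexError).
def Pre_extract_relevant_tags_from_correct_sents (tags : List (List (List (String × String)))) (indices : List (List (Int × Int))) (corrections : List (List String)) : Prop :=
  (pvZip3 tags indices corrections).all (fun s => pvSentenceOk s.1 s.2.1 s.2.2) = true
instance (tags : List (List (List (String × String)))) (indices : List (List (Int × Int))) (corrections : List (List String)) : Decidable (Pre_extract_relevant_tags_from_correct_sents tags indices corrections) := by unfold Pre_extract_relevant_tags_from_correct_sents; infer_instance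

def pvWitness_extract_relevant_tags_from_correct_sents : (List (List (List (String × String)))) × (List (List (Int × Int))) × List (List String) :=
  ([[[("form", "a")], [("form", "b")]], [[("form", "c")]]],
   [[((0 : Int), (1 : Int))], [((-1 : Int), (-1 : Int))]],
   [["x y"], []])

def Spec_extract_relevant_tags_from_correct_sents (tags : List (List (List (String × String)))) (indices : List (List (Int × Int))) (corrections : List (List String)) (out : List (Option (List (List (List (String × String)))))) : Prop := out = extract_relevant_tags_from_correct_sents_alt tags indices corrections
instance (tags : List (List (List (String × String)))) (indices : List (List (Int × Int))) (corrections : List (List String)) (out : List (Option (List (List (List (String × String)))))) : Decidable (Spec_extract_relevant_tags_from_correct_sents tags indices corrections out) := by unfold Spec_extract_relevant_tags_from_correct_sents; infer_instance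

-- ===== CLAIM (what is proved, stated in full; the proofs are below) =====
def Claim_equal_extract_relevant_tags_from_correct_sents : Prop := ∀ (tags : List (List (List (String × String)))) (indices : List (List (Int × Int))) (corrections : List (List String)), Dom_extract_relevant_tags_from_correct_sents tags indices corrections → Pre_extract_relevant_tags_from_correct_sents tags indices corrections → Spec_extract_relevant_tags_from_correct_sents tags indices corrections (extract_relevant_tags_from_correct_sents tags indices corrections)

-- ===== LEMMAS AND PROOFS =====

lemma pv_split_empty : ((PySem.Str.split₀ "").length : Int) = 0 := by
  simp [PySem.Str.split₀, PySem.Chars.split₀]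

lemma pv_gain_eq (a b g w : Int) (c : String) (hw : c = "" → w = 0) :
    (if a = b ∧ c ≠ "" then g + w
      else if c = "" ∧ a < b then g - (b - a)
      else if c ≠ "" ∧ a < b then g + (w - (b - a))
      else g) = g + (if b ≥ a then w - (b - a) else 0) := by
  by_cases hc : c = "" <;> split_ifs <;> simp_all <;> omega

lemma pv_inner_eq (tag_list : List (List (String × String))) :
    ∀ (ids : List (Int × Int)) (corrs : List String) (idsF : List (Int × Int)) (corrsF : List String)
      (j : Nat) (acc : List (List (List (String × String)))) (g : Int),
      idsF.drop j = ids → corrsF.drop j = corrs → ids.length ≤ corrs.length →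
      ((PySem.List.enumerate ids (j : Int)).foldl
        (fun (st : List (List (List (String × String))) × Int) e =>
          let x := e.1
          let id_pair := e.2
          let idx0 := (PySem.List.pyGetD idsF x ((0 : Int), (0 : Int))).1
          let corr := PySem.List.pyGetD corrsF x ""
          let k : Int := (PySem.Str.split₀ corr).length
          let row := (PySem.List.pyRange (idx0 + st.2) (idx0 + st.2 + k) 1).map
            (fun num => PySem.List.pyGetD tag_list num [])
          let gain :=
            if id_pair.1 = id_pair.2 ∧ corr ≠ "" then st.2 + k
            else if corr = "" ∧ id_pair.1 < id_pair.2 then st.2 - (id_pair.2 - id_pair.1)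
            else if corr ≠ "" ∧ id_pair.1 < id_pair.2 then st.2 + (k - (id_pair.2 - id_pair.1))
            else st.2
          (st.1 ++ [row], gain)) (acc, g)).1
      = acc ++ pvCollectGo tag_list (ids.zip corrs) g := by
  intro ids
  induction ids with
  | nil =>
    intro corrs idsF corrsF j acc g h1 h2 h3
    simp [PySem.List.enumerate, pvCollectGo]
  | cons p rest ih =>
    intro corrs idsF corrsF j acc g h1 h2 h3
    cases corrs with
    | nil => simp at h3
    | cons c crest =>
      have hidq : idsF[j]? = some p := by
        have h0 : (idsF.drop j)[0]? = idsF[j + 0]? := List.getElem?_drop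
        rw [h1] at h0
        simpa using h0.symm
      have hid : idsF.getD j ((0 : Int), (0 : Int)) = p := by
        simp [List.getD, hidq]
      have hcq : corrsF[j]? = some c := by
        have h0 : (corrsF.drop j)[0]? = corrsF[j + 0]? := List.getElem?_drop
        rw [h2] at h0
        simpa using h0.symm
      have hc : corrsF.getD j "" = c := by
        simp [List.getD, hcq]
      have hd1 : idsF.drop (j + 1) = rest := by
        have : idsF.drop (j + 1) = (idsF.drop j).drop 1 := by
          rw [List.drop_drop]
        rw [this, h1]
        simp
      have hd2 : corrsF.drop (j + 1) = crest := by
        have : corrsF.drop (j + 1) = (corrsF.drop j).drop 1 := by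
          rw [List.drop_drop]
        rw [this, h2]
        simp
      have h3' : rest.length ≤ crest.length := by
        simp at h3
        omega
      rw [PySem.List.enumerate_cons, List.foldl_cons]
      have hcast : ((j : Int) + 1) = ((j + 1 : Nat) : Int) := by push_cast; ring
      have hgain := pv_gain_eq p.1 p.2 g ((PySem.Str.split₀ c).length : Int) c
        (fun h => by rw [h]; exact pv_split_empty)
      have ihx := ih crest idsF corrsF (j + 1)
        (acc ++ [(PySem.List.pyRange (p.1 + g) (p.1 + g + ((PySem.Str.split₀ c).length : Int)) 1).map
          (fun num => PySem.List.pyGetD tag_list num [])])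
        (g + (if p.2 ≥ p.1 then ((PySem.Str.split₀ c).length : Int) - (p.2 - p.1) else 0)) hd1 hd2 h3'
      simp only [PySem.List.pyGetD_natCast, hid, hc, hcast]
      rw [hgain, ihx]
      simp [pvCollectGo]

-- ===== VERDICT =====
theorem extract_relevant_tags_from_correct_sents_spec : Claim_equal_extract_relevant_tags_from_correct_sents := by
  intro tags indices corrections _ hpre
  unfold Spec_extract_relevant_tags_from_correct_sents
  unfold Pre_extract_relevant_tags_from_correct_sents at hpre
  rw [List.all_eq_true] at hpre
  unfold extract_relevant_tags_from_correct_sents extract_relevant_tags_from_correct_sents_alt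
  have main : ∀ (l : List ((List (List (String × String))) × (List (Int × Int)) × List String))
      (acc : List (Option (List (List (List (String × String)))))),
      (∀ s ∈ l, pvSentenceOk s.1 s.2.1 s.2.2 = true) →
      l.foldl (fun relevant_tags s =>
        let tag_list := s.1
        let ids := s.2.1
        let corrs := s.2.2
        if ids = [((-1 : Int), (-1 : Int))] then relevant_tags ++ [none]
        else
          let st := (PySem.List.enumerate ids).foldl
            (fun (st : List (List (List (String × String))) × Int) e =>
              let x := e.1
              let id_pair := e.2
              let idx0 := (PySem.List.pyGetD ids x ((0 : Int), (0 : Int))).1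
              let corr := PySem.List.pyGetD corrs x ""
              let k : Int := (PySem.Str.split₀ corr).length
              let row := (PySem.List.pyRange (idx0 + st.2) (idx0 + st.2 + k) 1).map
                (fun num => PySem.List.pyGetD tag_list num [])
              let gain :=
                if id_pair.1 = id_pair.2 ∧ corr ≠ "" then st.2 + k
                else if corr = "" ∧ id_pair.1 < id_pair.2 then st.2 - (id_pair.2 - id_pair.1)
                else if corr ≠ "" ∧ id_pair.1 < id_pair.2 then st.2 + (k - (id_pair.2 - id_pair.1))
                else st.2
              (st.1 ++ [row], gain)) ([], (0 : Int))
          relevant_tags ++ [some st.1]) acc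
      = acc ++ l.map (fun s =>
          if s.2.1 = [((-1 : Int), (-1 : Int))] then none
          else some (pvCollect s.1 s.2.1 s.2.2)) := by
    intro l
    induction l with
    | nil => intro acc _; simp
    | cons x xs ih =>
      intro acc hok
      rw [List.foldl_cons, List.map_cons]
      by_cases hx : x.2.1 = [((-1 : Int), (-1 : Int))]
      · simp only [hx, ite_true]
        rw [ih _ (fun s hs => hok s (List.mem_cons_of_mem _ hs))]
        simp
      · have hokx := hok x (List.mem_cons_self ..)
        unfold pvSentenceOk at hokx
        simp only [hx, Bool.or_eq_true, decide_eq_true_eq, Bool.and_eq_true] at hokx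
        have hlen : x.2.1.length ≤ x.2.2.length := by
          rcases hokx with h | ⟨h, _⟩
          · exact h.elim
          · exact h
        simp only [hx, ite_false]
        rw [ih _ (fun s hs => hok s (List.mem_cons_of_mem _ hs))]
        have hinner := pv_inner_eq x.1 x.2.1 x.2.2 x.2.1 x.2.2 0 [] 0 (by simp) (by simp) hlen
        unfold pvCollect
        simp only [Nat.cast_zero] at hinner
        rw [hinner]
        simp
  rw [main _ [] (fun s hs => hpre s hs)]
  simp
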